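-- pv_equiv track=rewrite | github.com/zespere/vibeview | backend/app/services.py | _primary_kind
-- ===== SOURCE A (Python) =====
-- def _primary_kind(labels: list[str]) -> str:
--     priority = [
--         "Project",
--         "Folder",
--         "File",
--         "Module",
--         "Class",
--         "Interface",
--         "TypeAlias",
--         "Function",
--         "Method",
--     ]
--     for label in priority:
--         if label in labels:
--             return label
--     return labels[0] if labels else "Node"
-- ===== SOURCE B (Python) =====
-- def _primary_kind(labels: list[str]) -> str:
--     priority = [
--         "Project",
--         "Folder",
--         "File",
--         "Module",
--         "Class",
--         "Interface",
--         "TypeAlias",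
--         "Function",
--         "Method",
--     ]
--     rank = {label: i for i, label in enumerate(priority)}
--     best = min((rank[l] for l in labels if l in rank), default=len(priority))
--     if best < len(priority):
--         return priority[best]
--     return labels[0] if labels else "Node"
-- ===== Notes on version B (the rewrite author's own statement) =====
-- stated objective: idiomatic
-- what changed: Replaces the early-return membership scan over the fixed priority list with a rank dictionary built once and a single min over the input labels' ranks.
import Mathlib
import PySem

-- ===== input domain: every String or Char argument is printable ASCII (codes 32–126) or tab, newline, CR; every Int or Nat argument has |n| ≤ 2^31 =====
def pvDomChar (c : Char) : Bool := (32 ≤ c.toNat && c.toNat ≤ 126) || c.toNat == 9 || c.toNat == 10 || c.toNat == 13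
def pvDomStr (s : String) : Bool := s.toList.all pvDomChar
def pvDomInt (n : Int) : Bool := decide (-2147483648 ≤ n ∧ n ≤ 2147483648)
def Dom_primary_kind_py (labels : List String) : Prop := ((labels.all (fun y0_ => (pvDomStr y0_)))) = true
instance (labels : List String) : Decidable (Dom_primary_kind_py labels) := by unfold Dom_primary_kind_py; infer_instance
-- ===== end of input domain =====

-- B replaces A's early-return membership scan over the fixed priority list by a rank
-- dictionary and a single min over the input labels' ranks (idiomatic; same observable result).

-- ===== PORT A =====
def pvPriority : List String :=
  ["Project", "Folder", "File", "Module", "Class", "Interface", "TypeAlias", "Function", "Method"]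

-- the 'for label in priority: if label in labels: return label' loop
def pvAFor (ps : List String) (labels : List String) : Option String :=
  match ps with
  | [] => none
  | p :: rest => if labels.contains p then some p else pvAFor rest labels

def primary_kind_py (labels : List String) : String :=
  match pvAFor pvPriority labels with
  | some l => l
  | none => match labels with
            | x :: _ => x
            | [] => "Node"

-- ===== PORT B =====
-- rank = {label: i for i, label in enumerate(priority)}
def pvRank : PySem.Dict String Nat :=
  PySem.Dict.ofList [("Project", 0), ("Folder", 1), ("File", 2), ("Module", 3), ("Class", 4),
                     ("Interface", 5), ("TypeAlias", 6), ("Function", 7), ("Method", 8)]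

def primary_kind_py_alt (labels : List String) : String :=
  -- best = min((rank[l] for l in labels if l in rank), default=len(priority))
  let best := labels.foldl (fun m l => match pvRank.get? l with
                                       | some r => min m r
                                       | none => m) 9
  if best < 9 then
    pvPriority.getD best "Node"   -- priority[best]; best < 9 so the default is unreachable
  else
    match labels with
    | x :: _ => x
    | [] => "Node"

-- ===== PRECONDITION & SPEC =====
def Spec_primary_kind_py (labels : List String) (out : String) : Prop := out = primary_kind_py_alt labels
instance (labels : List String) (out : String) : Decidable (Spec_primary_kind_py labels out) := by unfold Spec_primary_kind_py; infer_instance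

-- ===== CLAIM (what is proved, stated in full; the proofs are below) =====
def Claim_equal_primary_kind_py : Prop := ∀ (labels : List String), Dom_primary_kind_py labels → Spec_primary_kind_py labels (primary_kind_py labels)

-- ===== LEMMAS AND PROOFS =====

-- rkD l : the rank of l, with 9 (= no rank) for non-priority labels
def rkD (l : String) : Nat := (pvRank.get? l).getD 9

lemma pvRank_mk : pvRank = PySem.Dict.mk
    [("Project", 0), ("Folder", 1), ("File", 2), ("Module", 3), ("Class", 4),
     ("Interface", 5), ("TypeAlias", 6), ("Function", 7), ("Method", 8)] := by decide

lemma rank_cases (l : String) (r : Nat) (h : pvRank.get? l = some r) :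
    r < 9 ∧ pvPriority.getD r "Node" = l := by
  rw [pvRank_mk] at h
  simp only [PySem.Dict.get?_mk_cons] at h
  split_ifs at h with h1 h2 h3 h4 h5 h6 h7 h8 h9 <;>
    simp_all [pvPriority, PySem.Dict.get?] <;> (subst_vars; decide)

lemma rkD_le (l : String) : rkD l ≤ 9 := by
  unfold rkD
  cases h : pvRank.get? l with
  | none => simp
  | some r => simpa using Nat.le_of_lt (rank_cases l r h).1

lemma rkD_of_mem_priority (r : Nat) (hr : r < 9) :
    rkD (pvPriority.getD r "Node") = r := by
  interval_cases r <;> decide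

-- the foldl in B equals min of the seed with a right fold of ranks
def Mv (ls : List String) : Nat := (ls.map rkD).foldr min 9

lemma foldl_eq_Mv (ls : List String) : ∀ m, m ≤ 9 →
    ls.foldl (fun m l => match pvRank.get? l with
                         | some r => min m r
                         | none => m) m = min m (Mv ls) := by
  induction ls with
  | nil => intro m hm; simp [Mv]; omega
  | cons l t ih =>
    intro m hm
    have hstep : (match pvRank.get? l with
                  | some r => min m r
                  | none => m) = min m (rkD l) := by
      unfold rkD
      cases h : pvRank.get? l with
      | none => simp; omega
      | some r => simp
    have hle : min m (rkD l) ≤ 9 := by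
      have := rkD_le l; omega
    simp only [List.foldl_cons, hstep, ih _ hle, Mv, List.map_cons, List.foldr_cons]
    omega

lemma Mv_le (ls : List String) : Mv ls ≤ 9 := by
  induction ls with
  | nil => simp [Mv]
  | cons l t ih => simp only [Mv, List.map_cons, List.foldr_cons] at *; omega

lemma Mv_lower (ls : List String) : ∀ l ∈ ls, Mv ls ≤ rkD l := by
  induction ls with
  | nil => simp
  | cons x t ih =>
    intro l hl
    rcases List.mem_cons.mp hl with h | h
    · subst h; simp only [Mv, List.map_cons, List.foldr_cons]; omega
    · have := ih l h
      simp only [Mv, List.map_cons, List.foldr_cons] at *; omega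

lemma Mv_mem (ls : List String) : Mv ls = 9 ∨ ∃ l ∈ ls, rkD l = Mv ls := by
  induction ls with
  | nil => left; simp [Mv]
  | cons x t ih =>
    by_cases h : rkD x ≤ Mv t
    · right; exact ⟨x, by simp, by simp only [Mv, List.map_cons, List.foldr_cons] at *; omega⟩
    · have he : Mv (x :: t) = Mv t := by
        simp only [Mv, List.map_cons, List.foldr_cons] at *; omega
      rcases ih with h9 | ⟨l, hl, he2⟩
      · left; omega
      · right; exact ⟨l, List.mem_cons_of_mem _ hl, by omega⟩

lemma contains_false {labels : List String} {s : String} (h : s ∉ labels) :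
    labels.contains s = false := by
  simpa using h

lemma pvAFor_none (ps labels : List String) (h : ∀ q ∈ ps, q ∉ labels) :
    pvAFor ps labels = none := by
  induction ps with
  | nil => rfl
  | cons p t ih =>
    simp only [pvAFor, contains_false (h p (by simp))]
    exact ih (fun q hq => h q (List.mem_cons_of_mem _ hq))

lemma pvAFor_hit (pre suf labels : List String) (p : String)
    (hp : p ∈ labels) (hpre : ∀ q ∈ pre, q ∉ labels) :
    pvAFor (pre ++ p :: suf) labels = some p := by
  induction pre with
  | nil => simp [pvAFor, hp]
  | cons q t ih =>
    simp only [List.cons_append, pvAFor, contains_false (hpre q (by simp))]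
    exact ih (fun x hx => hpre x (List.mem_cons_of_mem _ hx))

lemma priority_decomp (m : Nat) (hm : m < 9) :
    pvPriority = pvPriority.take m ++ pvPriority.getD m "Node" :: pvPriority.drop (m + 1) := by
  interval_cases m <;> decide

lemma rk_priority_lt : ∀ q ∈ pvPriority, rkD q < 9 := by decide

lemma take_mem (m : Nat) (hm : m < 9) (q : String) (hq : q ∈ pvPriority.take m) :
    ∃ j < m, pvPriority.getD j "Node" = q := by
  rw [List.mem_iff_getElem] at hq
  rcases hq with ⟨j, hj, he⟩
  have hjm : j < m := by
    have : (pvPriority.take m).length ≤ m := by simp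
    omega
  have hj9 : j < pvPriority.length := by simp [pvPriority]; omega
  refine ⟨j, hjm, ?_⟩
  rw [List.getElem_take] at he
  rw [List.getD_eq_getElem _ _ hj9]
  exact he

-- ===== VERDICT (by name: the statement is the Claim_ definition above) =====
theorem primary_kind_py_spec : Claim_equal_primary_kind_py := by
  intro labels _
  unfold Spec_primary_kind_py primary_kind_py primary_kind_py_alt
  rw [foldl_eq_Mv labels 9 (le_refl _)]
  have hMle := Mv_le labels
  have hmin : min 9 (Mv labels) = Mv labels := by omega
  rw [hmin]
  by_cases h9 : Mv labels = 9
  · -- no priority label present: both fall back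
    have hnone : pvAFor pvPriority labels = none := by
      apply pvAFor_none
      intro q hq hmem
      -- q is a priority string; its rank would bound Mv below 9
      have hlow := Mv_lower labels q hmem
      have hr := rk_priority_lt q hq
      omega
    rw [hnone]
    simp [h9]
  · have hlt : Mv labels < 9 := by omega
    rcases Mv_mem labels with h | ⟨l, hl, hrk⟩
    · omega
    -- l has rank Mv labels, so l is the (Mv labels)-th priority string and it is in labels
    have hsome : pvRank.get? l = some (Mv labels) := by
      unfold rkD at hrk
      cases h : pvRank.get? l with
      | none => rw [h] at hrk; simp at hrk; omega
      | some r => rw [h] at hrk; simp at hrk; rw [hrk]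
    have hchar := rank_cases l (Mv labels) hsome
    have hpmem : pvPriority.getD (Mv labels) "Node" ∈ labels := by rw [hchar.2]; exact hl
    have hAfor : pvAFor pvPriority labels = some (pvPriority.getD (Mv labels) "Node") := by
      conv_lhs => rw [priority_decomp (Mv labels) hlt]
      apply pvAFor_hit _ _ _ _ hpmem
      intro q hq hqmem
      rcases take_mem (Mv labels) hlt q hq with ⟨j, hj, hje⟩
      have hlow := Mv_lower labels q hqmem
      rw [← hje, rkD_of_mem_priority j (by omega)] at hlow
      omega
    rw [hAfor]
    simp [hlt]
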